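-- pv_equiv track=rewrite | github.com/Chayan199916/regex-engine | regex_engine/parser.py | parse
-- ===== SOURCE A (Python) =====
-- from typing import List
--
-- def parse(regex: str) -> List[str]:
--     j = 0
--     pattern = []
--     while j < len(regex):
--         if regex[j: j + 2] in ("\\d", "\\w"):
--             pattern.append(regex[j:j+2])
--             j += 2
--         elif regex[j: j + 2] == "[^" and "]" in regex[j:]:
--             end = regex.index("]", j) + 1
--             pattern.append(regex[j:end])
--             j = end
--         elif regex[j] == "[" and "]" in regex[j:]:
--             end = regex.index("]", j) + 1
--             pattern.append(regex[j:end])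
--             j = end
--         else:
--             pattern.append(regex[j])
--             j += 1
--     return pattern
-- ===== SOURCE B (Python) =====
-- from typing import List
--
-- def parse(regex: str) -> List[str]:
--     n = len(regex)
--     # one backward pass: next_close[i] = index of the first ']' at or after i, or n if none
--     next_close = [0] * n
--     nxt = n
--     for i in range(n - 1, -1, -1):
--         if regex[i] == ']':
--             nxt = i
--         next_close[i] = nxt
--     pattern = []
--     j = 0
--     while j < n:
--         c = regex[j]
--         if c == '\\' and j + 1 < n and regex[j + 1] in 'dw':
--             pattern.append(regex[j:j + 2])
--             j += 2
--         elif c == '[' and next_close[j] < n: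
--             end = next_close[j] + 1
--             pattern.append(regex[j:end])
--             j = end
--         else:
--             pattern.append(c)
--             j += 1
--     return pattern
-- ===== Notes on version B (the rewrite author's own statement) =====
-- stated objective: faster
-- what changed: B precomputes the next-']' position for every index in one backward pass and merges the '[^' and '[' branches, so the per-position "']' in regex[j:]" scan and regex.index call disappear: O(n) instead of A's O(n^2).
import Mathlib
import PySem

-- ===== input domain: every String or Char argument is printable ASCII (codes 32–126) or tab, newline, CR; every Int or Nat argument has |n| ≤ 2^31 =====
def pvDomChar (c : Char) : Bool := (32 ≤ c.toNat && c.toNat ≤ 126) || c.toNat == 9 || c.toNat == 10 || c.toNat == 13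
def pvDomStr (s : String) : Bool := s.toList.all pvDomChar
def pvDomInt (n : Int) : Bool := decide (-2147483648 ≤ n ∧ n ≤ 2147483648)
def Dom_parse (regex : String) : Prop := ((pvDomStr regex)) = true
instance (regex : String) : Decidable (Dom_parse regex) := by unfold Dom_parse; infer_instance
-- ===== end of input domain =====

-- B precomputes next-']' positions in one backward pass and merges A's two bracket branches, replacing A's per-position suffix scans.

-- ===== PORT A =====
-- A's while-loop over index j; every slice A takes starts at j, so the loop is the structural
-- recursion on the suffix regex[j:] (regex[j:j+2] = take 2; regex.index("]", j) relative to j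
-- = idxOf ']' on the suffix, guarded by the same membership test A makes).
def parseAux (s : List Char) : List String :=
  match s with
  | [] => []
  | c :: rest =>
    let two := (c :: rest).take 2
    if two = ['\\', 'd'] ∨ two = ['\\', 'w'] then
      String.ofList two :: parseAux (rest.drop 1)
    else if two = ['[', '^'] ∧ ']' ∈ c :: rest then
      let e := (c :: rest).idxOf ']' + 1
      String.ofList ((c :: rest).take e) :: parseAux ((c :: rest).drop e)
    else if c = '[' ∧ ']' ∈ c :: rest then
      let e := (c :: rest).idxOf ']' + 1
      String.ofList ((c :: rest).take e) :: parseAux ((c :: rest).drop e)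
    else
      String.ofList [c] :: parseAux rest
  termination_by s.length
  decreasing_by all_goals (simp; try omega)

def parse (regex : String) : List String := parseAux regex.toList

-- ===== PORT B =====
-- Source B's backward pass building next_close, rendered right-to-left structurally:
-- entry for position i is i if s[i] = ']', else the carried value = head of the tail build (n if none).
def ncBuild (s : List Char) (i : Nat) (n : Nat) : List Nat :=
  match s with
  | [] => []
  | c :: rest =>
    let tail := ncBuild rest (i + 1) n
    (if c = ']' then i else tail.headD n) :: tail

-- Source B's while-loop; fuel only makes the jumping-index loop total (n steps always suffice).
def parseBLoop (s : List Char) (nc : List Nat) (n : Nat) : Nat → Nat → List String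
  | 0, _ => []
  | fuel + 1, j =>
    if j < n then
      let c := s.getD j ' '
      if c = '\\' ∧ j + 1 < n ∧ (s.getD (j + 1) ' ' = 'd' ∨ s.getD (j + 1) ' ' = 'w') then
        String.ofList [c, s.getD (j + 1) ' '] :: parseBLoop s nc n fuel (j + 2)
      else if c = '[' ∧ nc.getD j n < n then
        String.ofList ((s.drop j).take (nc.getD j n + 1 - j)) ::
          parseBLoop s nc n fuel (nc.getD j n + 1)
      else
        String.ofList [c] :: parseBLoop s nc n fuel (j + 1)
    else []

def parse_alt (regex : String) : List String :=
  let s := regex.toList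
  let n := s.length
  parseBLoop s (ncBuild s 0 n) n n 0

-- ===== PRECONDITION & SPEC =====
def Spec_parse (regex : String) (out : List String) : Prop := out = parse_alt regex
instance (regex : String) (out : List String) : Decidable (Spec_parse regex out) := by unfold Spec_parse; infer_instance

-- ===== CLAIM (what is proved, stated in full; the proofs are below) =====
def Claim_equal_parse : Prop := ∀ (regex : String), Dom_parse regex → Spec_parse regex (parse regex)

-- ===== LEMMAS AND PROOFS =====

theorem parseAux_nil : parseAux [] = [] := by rw [parseAux.eq_def]

theorem parseAux_cons (c : Char) (rest : List Char) :
    parseAux (c :: rest) =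
    (if (c :: rest).take 2 = ['\\', 'd'] ∨ (c :: rest).take 2 = ['\\', 'w'] then
      String.ofList ((c :: rest).take 2) :: parseAux (rest.drop 1)
    else if (c :: rest).take 2 = ['[', '^'] ∧ ']' ∈ c :: rest then
      String.ofList ((c :: rest).take ((c :: rest).idxOf ']' + 1)) ::
        parseAux ((c :: rest).drop ((c :: rest).idxOf ']' + 1))
    else if c = '[' ∧ ']' ∈ c :: rest then
      String.ofList ((c :: rest).take ((c :: rest).idxOf ']' + 1)) ::
        parseAux ((c :: rest).drop ((c :: rest).idxOf ']' + 1))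
    else
      String.ofList [c] :: parseAux rest) := by
  rw [parseAux.eq_def]

theorem ncBuild_headD (s : List Char) (i n : Nat) :
    (ncBuild s i n).headD n = if ']' ∈ s then i + s.idxOf ']' else n := by
  induction s generalizing i with
  | nil => simp [ncBuild]
  | cons c rest ih =>
    by_cases hc : c = ']'
    · simp [ncBuild, hc]
    · have hcb : (c == ']') = false := by simp [hc]
      simp only [ncBuild, List.headD_cons, if_neg hc, ih]
      by_cases hm : ']' ∈ rest
      · have hmem : ']' ∈ c :: rest := List.mem_cons_of_mem _ hm
        simp [hm, hmem, List.idxOf_cons, hcb]; omega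
      · have hmem : ¬ ']' ∈ c :: rest := by
          simp [List.mem_cons, hm]; exact fun h => absurd h.symm hc
        simp [hm, hmem]

theorem ncBuild_getD (s : List Char) (i n j : Nat) (hj : j < s.length) :
    (ncBuild s i n).getD j n =
      if ']' ∈ s.drop j then i + j + (s.drop j).idxOf ']' else n := by
  induction s generalizing i j with
  | nil => simp at hj
  | cons c rest ih =>
    cases j with
    | zero =>
      have := ncBuild_headD (c :: rest) i n
      simpa [List.getD, List.headD_eq_head?] using this
    | succ j' =>
      have hj' : j' < rest.length := by simpa using hj
      have := ih (i + 1) j' hj'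
      simp only [ncBuild, List.drop_succ_cons, List.getD_cons_succ]
      rw [this]
      by_cases hm : ']' ∈ rest.drop j'
      · simp [hm]; omega
      · simp [hm]

theorem parseBLoop_eq (s : List Char) (fuel j : Nat)
    (hf : s.length - j ≤ fuel) :
    parseBLoop s (ncBuild s 0 s.length) s.length fuel j = parseAux (s.drop j) := by
  induction fuel generalizing j with
  | zero =>
    have : s.length ≤ j := by omega
    simp [parseBLoop, List.drop_eq_nil_of_le this, parseAux_nil]
  | succ fuel ih =>
    by_cases hj : j < s.length
    · have hdrop : s.drop j = s[j] :: s.drop (j + 1) := List.drop_eq_getElem_cons hj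
      have hc : s.getD j ' ' = s[j] := List.getD_eq_getElem s ' ' hj
      have hnc := ncBuild_getD s 0 s.length j hj
      rw [hdrop, parseAux_cons]
      by_cases hj1 : j + 1 < s.length
      · -- at least two chars remain
        have hdrop1 : s.drop (j + 1) = s[j+1] :: s.drop (j + 2) := by
          rw [show j + 2 = j + 1 + 1 from rfl]
          exact List.drop_eq_getElem_cons hj1
        have hc1 : s.getD (j + 1) ' ' = s[j+1] := List.getD_eq_getElem s ' ' hj1
        have htwo : (s[j] :: s.drop (j + 1)).take 2 = [s[j], s[j+1]] := by
          rw [hdrop1]; rfl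
        by_cases hbs : s[j] = '\\' ∧ (s[j+1] = 'd' ∨ s[j+1] = 'w')
        · -- branch 1 on both sides
          have hA : (s[j] :: s.drop (j + 1)).take 2 = ['\\', 'd'] ∨
                    (s[j] :: s.drop (j + 1)).take 2 = ['\\', 'w'] := by
            rw [htwo]; rcases hbs with ⟨h1, h2 | h2⟩ <;> simp [h1, h2]
          rw [if_pos hA]
          rw [parseBLoop, if_pos hj, hc, hc1, if_pos ⟨hbs.1, hj1, hbs.2⟩]
          rw [ih (j + 2) (by omega), htwo]
          have : (s.drop (j + 1)).drop 1 = s.drop (j + 2) := by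
            rw [hdrop1]; rfl
          rw [this]
        · -- branch 1 false on both sides
          have hA1 : ¬((s[j] :: s.drop (j + 1)).take 2 = ['\\', 'd'] ∨
                      (s[j] :: s.drop (j + 1)).take 2 = ['\\', 'w']) := by
            rw [htwo]; rintro (h | h) <;>
              · simp at h; exact hbs ⟨h.1, by simp [h.2]⟩
          have hB1 : ¬(s.getD j ' ' = '\\' ∧ j + 1 < s.length ∧
                       (s.getD (j + 1) ' ' = 'd' ∨ s.getD (j + 1) ' ' = 'w')) := by
            rw [hc, hc1]; rintro ⟨h1, _, h3⟩; exact hbs ⟨h1, h3⟩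
          rw [if_neg hA1]
          rw [parseBLoop, if_pos hj, if_neg hB1]
          by_cases hbr : s[j] = '[' ∧ ']' ∈ s.drop j
          · -- bracket branch on both sides
            have hncv : (ncBuild s 0 s.length).getD j s.length =
                j + (s.drop j).idxOf ']' := by
              rw [hnc, if_pos hbr.2]; omega
            have hidx : (s.drop j).idxOf ']' < s.length - j := by
              have := List.idxOf_lt_length_of_mem hbr.2
              simpa using this
            have hBc : s.getD j ' ' = '[' ∧
                (ncBuild s 0 s.length).getD j s.length < s.length := by
              exact ⟨hc.trans hbr.1, by rw [hncv]; omega⟩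
            rw [if_pos hBc]
            have he : (ncBuild s 0 s.length).getD j s.length + 1 - j =
                (s.drop j).idxOf ']' + 1 := by rw [hncv]; omega
            have htok : (s.drop j).take ((ncBuild s 0 s.length).getD j s.length + 1 - j) =
                (s[j] :: s.drop (j + 1)).take ((s[j] :: s.drop (j + 1)).idxOf ']' + 1) := by
              rw [he, ← hdrop]
            have hdropeq : s.drop ((ncBuild s 0 s.length).getD j s.length + 1) =
                (s[j] :: s.drop (j + 1)).drop ((s[j] :: s.drop (j + 1)).idxOf ']' + 1) := by
              rw [← hdrop, hncv, List.drop_drop]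
              congr 1
            have hrec := ih ((ncBuild s 0 s.length).getD j s.length + 1)
              (by rw [hncv]; omega)
            by_cases h2 : (s[j] :: s.drop (j + 1)).take 2 = ['[', '^'] ∧
                ']' ∈ s[j] :: s.drop (j + 1)
            · rw [if_pos h2, hrec, htok, hdropeq]
            · rw [if_neg h2, if_pos ⟨hbr.1, hdrop ▸ hbr.2⟩, hrec, htok, hdropeq]
          · -- plain char on both sides
            have hA2 : ¬((s[j] :: s.drop (j + 1)).take 2 = ['[', '^'] ∧
                        ']' ∈ s[j] :: s.drop (j + 1)) := by
              rintro ⟨h2, hm⟩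
              rw [htwo] at h2; simp at h2
              exact hbr ⟨h2.1, hdrop ▸ hm⟩
            have hA3 : ¬(s[j] = '[' ∧ ']' ∈ s[j] :: s.drop (j + 1)) := by
              rintro ⟨h1, hm⟩; exact hbr ⟨h1, hdrop ▸ hm⟩
            have hB2 : ¬(s.getD j ' ' = '[' ∧
                (ncBuild s 0 s.length).getD j s.length < s.length) := by
              rw [hc]; rintro ⟨h1, h2⟩
              rw [hnc] at h2
              by_cases hm : ']' ∈ s.drop j
              · exact hbr ⟨h1, hm⟩
              · simp [hm] at h2
            rw [if_neg hA2, if_neg hA3, if_neg hB2, hc]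
            rw [ih (j + 1) (by omega)]
      · -- exactly one char remains
        have hlast : s.drop (j + 1) = [] := List.drop_eq_nil_of_le (by omega)
        rw [hlast]
        rw [parseBLoop, if_pos hj, hc]
        have hB1 : ¬(s[j] = '\\' ∧ j + 1 < s.length ∧
            (s.getD (j + 1) ' ' = 'd' ∨ s.getD (j + 1) ' ' = 'w')) := by
          rintro ⟨_, h, _⟩; omega
        have hdj : s.drop j = [s[j]] := by rw [hdrop, hlast]
        have hB2 : ¬(s[j] = '[' ∧ (ncBuild s 0 s.length).getD j s.length < s.length) := by
          rintro ⟨h1, h2⟩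
          rw [hnc, hdj] at h2
          by_cases hm : ']' ∈ ([s[j]] : List Char)
          · simp [h1] at hm
          · simp [hm] at h2
        rw [if_neg hB1, if_neg hB2]
        have hA1 : ¬(([s[j]] : List Char).take 2 = ['\\', 'd'] ∨
            ([s[j]] : List Char).take 2 = ['\\', 'w']) := by simp
        have hA2 : ¬(([s[j]] : List Char).take 2 = ['[', '^'] ∧ ']' ∈ ([s[j]] : List Char)) := by
          simp
        rw [if_neg hA1, if_neg hA2]
        by_cases hb3 : s[j] = '[' ∧ ']' ∈ ([s[j]] : List Char)
        · exfalso; rcases hb3 with ⟨h1, hm⟩; simp [h1] at hm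
        · rw [if_neg hb3]
          have hrec := ih (j + 1) (by omega)
          rw [hlast] at hrec
          rw [hrec, parseAux_nil]
    · rw [parseBLoop, if_neg hj]
      rw [List.drop_eq_nil_of_le (by omega), parseAux_nil]

-- ===== VERDICT (by name: the statement is the Claim_ definition above) =====
theorem parse_spec : Claim_equal_parse := by
  intro regex _
  unfold Spec_parse parse parse_alt
  exact (parseBLoop_eq regex.toList regex.toList.length 0 (by omega)).symm
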